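-- pv_equiv track=rewrite | github.com/raeez/chiral-bar-cobar | compute/tests/test_minimal_resolution_chiral_engine.py | _colored_partitions
-- ===== SOURCE A (Python) =====
-- from math import comb
--
-- def _colored_partitions(n: int, colors: int) -> int:
--     """Coefficient of q^n in prod_{m>=1} 1/(1-q^m)^{colors}."""
--     dp = [0] * (n + 1)
--     dp[0] = 1
--     for m in range(1, n + 1):
--         new_dp = [0] * (n + 1)
--         for k in range(n + 1):
--             if dp[k] == 0:
--                 continue
--             j = 0
--             while k + j * m <= n:
--                 new_dp[k + j * m] += dp[k] * comb(j + colors - 1, colors - 1)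
--                 j += 1
--         dp = new_dp
--     return dp[n]
-- ===== SOURCE B (Python) =====
-- from math import comb
--
-- def _colored_partitions(n: int, colors: int) -> int:
--     """Coefficient of q^n in prod_{m>=1} 1/(1-q^m)^{colors}."""
--     dp = [0] * (n + 1)
--     dp[0] = 1
--     for m in range(1, n + 1):
--         # multiply by 1/(1-q^m)^colors in place: since (1-q^m)^colors * result = dp,
--         # dp[i] += sum_t (-1)^(t+1) * C(colors, t) * dp[i - t*m] over the already-updated prefix
--         coefs = [(-1) ** (t + 1) * comb(colors, t)
--                  for t in range(1, min(colors, n // m) + 1)]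
--         for i in range(m, n + 1):
--             s = 0
--             for t, cf in enumerate(coefs, 1):
--                 if t * m > i:
--                     break
--                 s += cf * dp[i - t * m]
--             dp[i] += s
--     return dp[n]
-- ===== Notes on version B (the rewrite author's own statement) =====
-- stated objective: alternative
-- what changed: Instead of A's per-m binomial convolution (new_dp[k+j*m] += dp[k]*comb(j+colors-1,colors-1) over all k and j), B multiplies by the inverse of the polynomial (1-q^m)^colors in place: per m it precomputes the at most min(colors, n//m) alternating coefficients (-1)^(t+1)*C(colors,t) once and updates dp[i] from the already-updated prefix; intended as faster (measured 2.7x at the largest size both finished, unconfirmed at sizes where both time out).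
import Mathlib
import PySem

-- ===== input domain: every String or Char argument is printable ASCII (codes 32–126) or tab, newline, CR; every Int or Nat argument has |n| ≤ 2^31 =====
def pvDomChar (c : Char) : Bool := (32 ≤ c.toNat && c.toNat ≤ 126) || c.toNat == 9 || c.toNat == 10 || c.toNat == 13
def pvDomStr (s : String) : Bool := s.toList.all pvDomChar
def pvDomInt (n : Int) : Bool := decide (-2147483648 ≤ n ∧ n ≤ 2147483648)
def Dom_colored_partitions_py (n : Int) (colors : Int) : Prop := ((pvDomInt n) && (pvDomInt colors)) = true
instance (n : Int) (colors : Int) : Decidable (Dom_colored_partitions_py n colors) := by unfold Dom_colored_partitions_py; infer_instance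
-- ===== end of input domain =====

-- B replaces A's per-m binomial convolution by the in-place recurrence obtained from multiplying by
-- the inverse polynomial (1-q^m)^colors, with at most min(colors, n//m) coefficients per m (objective: alternative).

-- ===== PORT A =====
-- math.comb on the nonnegative arguments Pre_ admits (library call, ported as the
-- binomial coefficient computed by falling factorial; pvComb_eq_choose below)
def pvComb (a b : Int) : Int :=
  let n := a.toNat
  let k := b.toNat
  if k ≤ n then ((n.descFactorial (min k (n - k))) / ((min k (n - k)).factorial) : Nat) else 0

-- body of A's `for m` loop: new_dp built by the k/j double loop.
-- The `while k + j*m <= n` loop is ported as a fold over j = 0..(N-k)/m with the loop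
-- guard: k + j*m is strictly increasing in j (m ≥ 1) and the condition holds exactly
-- for j ≤ (N-k)/m, so the guarded fold performs exactly the while-loop's iterations.
def pvAStep (N : Nat) (colors : Int) (dp : List Int) (m : Nat) : List Int :=
  (List.range (N + 1)).foldl (fun nd k =>
    if dp.getD k 0 = 0 then nd
    else (List.range ((N - k) / m + 1)).foldl (fun nd j =>
      if k + j * m ≤ N then
        nd.set (k + j * m)
          (nd.getD (k + j * m) 0 + dp.getD k 0 * pvComb ((j : Int) + colors - 1) (colors - 1))
      else nd) nd) (List.replicate (N + 1) 0)

def colored_partitions_py (n : Int) (colors : Int) : Int :=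
  let N := n.toNat
  let dp0 : List Int := (List.replicate (N + 1) 0).set 0 1
  ((List.range' 1 N).foldl (pvAStep N colors) dp0).getD N 0

-- ===== PORT B =====
-- body of B's `for m` loop: coefs = [(-1)^(t+1)*C(colors,t) for t in 1..min(colors, n//m)],
-- then dp[i] += sum of coefs[t-1]*dp[i-t*m] in place for i = m..n.
-- The inner `break` at t*m > i is ported as the same guard on a fold over all of coefs:
-- t*m is increasing in t, so the guarded fold performs exactly the pre-break iterations.
def pvBStep (N : Nat) (colors : Int) (dp : List Int) (m : Nat) : List Int :=
  let coefs : List Int := (List.range' 1 (min colors ((N / m : Nat) : Int)).toNat).map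
      (fun (t : Nat) => (-1 : Int) ^ (t + 1) * pvComb colors (t : Int))
  (List.range' m (N + 1 - m)).foldl (fun dp i =>
    let s := (List.range' 1 coefs.length).foldl (fun s t =>
      if t * m ≤ i then s + coefs.getD (t - 1) 0 * dp.getD (i - t * m) 0 else s) 0
    dp.set i (dp.getD i 0 + s)) dp

def colored_partitions_py_alt (n : Int) (colors : Int) : Int :=
  let N := n.toNat
  let dp0 : List Int := (List.replicate (N + 1) 0).set 0 1
  ((List.range' 1 N).foldl (pvBStep N colors) dp0).getD N 0

-- ===== PRECONDITION & SPEC =====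
-- Pre_ excludes exactly the inputs where A raises: n < 0 (IndexError on dp[0]) and
-- n ≥ 1 with colors ≤ 0 (math.comb raises ValueError on a negative second argument).
def Pre_colored_partitions_py (n : Int) (colors : Int) : Prop := 0 ≤ n ∧ (n = 0 ∨ 1 ≤ colors)
instance (n : Int) (colors : Int) : Decidable (Pre_colored_partitions_py n colors) := by
  unfold Pre_colored_partitions_py; infer_instance

def pvWitness_colored_partitions_py : Int × Int := (6, 2)

def Spec_colored_partitions_py (n : Int) (colors : Int) (out : Int) : Prop :=
  out = colored_partitions_py_alt n colors
instance (n : Int) (colors : Int) (out : Int) : Decidable (Spec_colored_partitions_py n colors out) := by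
  unfold Spec_colored_partitions_py; infer_instance

-- ===== CLAIM (what is proved, stated in full; the proofs are below) =====
def Claim_equal_colored_partitions_py : Prop := ∀ (n : Int) (colors : Int),
  Dom_colored_partitions_py n colors → Pre_colored_partitions_py n colors →
  Spec_colored_partitions_py n colors (colored_partitions_py n colors)

-- ===== LEMMAS AND PROOFS =====

-- mathematical model: pvTa m c1 f = f multiplied by 1/(1-q^m)^(c1+1), coefficientwise
def pvDelta : Nat → Int := fun i => if i = 0 then 1 else 0

def pvTa (m c1 : Nat) (f : Nat → Int) (i : Nat) : Int :=
  ∑ t ∈ Finset.range (i / m + 1), f (i - t * m) * ((t + c1).choose c1 : Int)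

def pvRepr (N : Nat) (dp : List Int) (f : Nat → Int) : Prop :=
  dp.length = N + 1 ∧ ∀ i, i ≤ N → dp.getD i 0 = f i

lemma pv_getD_set (l : List Int) (p : Nat) (v : Int) (i : Nat) :
    (l.set p v).getD i 0 = if p = i ∧ p < l.length then v else l.getD i 0 := by
  simp only [List.getD_eq_getElem?_getD, List.getElem?_set]
  split_ifs with h1 h2 h3 h4 <;> simp_all <;> omega

lemma pv_sum_map_range' (h : Nat → Int) : ∀ (len a : Nat),
    ((List.range' a len).map h).sum = ∑ j ∈ Finset.range len, h (a + j) := by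
  intro len
  induction len with
  | zero => simp
  | succ k ih =>
    intro a
    rw [List.range'_concat, List.map_append, List.sum_append, Finset.sum_range_succ, ih a]
    simp

lemma pv_sum_map_range (h : Nat → Int) (n : Nat) :
    ((List.range n).map h).sum = ∑ j ∈ Finset.range n, h j := by
  rw [List.range_eq_range', pv_sum_map_range' h n 0]
  simp

-- ta below m is the identity
lemma pv_ta_of_lt {m c1 : Nat} (f : Nat → Int) {i : Nat} (h : i < m) : pvTa m c1 f i = f i := by
  unfold pvTa
  rw [Nat.div_eq_of_lt h]
  simp

-- the two one-step recurrences of ta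
lemma pv_ta_zero_rec {m : Nat} (hm : 1 ≤ m) (f : Nat → Int) (i : Nat) :
    pvTa m 0 f i = f i + (if m ≤ i then pvTa m 0 f (i - m) else 0) := by
  unfold pvTa
  simp only [Nat.add_zero, Nat.choose_zero_right, Nat.cast_one, mul_one]
  by_cases hmi : m ≤ i
  · rw [if_pos hmi, Nat.div_eq_sub_div hm hmi, Finset.sum_range_succ']
    have hidx : ∀ t : Nat, i - (t + 1) * m = i - m - t * m := by
      intro t
      have h1 : (t + 1) * m = m + t * m := by ring
      rw [h1, Nat.sub_sub]
    rw [Finset.sum_congr rfl (fun t _ => by rw [hidx t])]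
    simp [add_comm]
  · rw [if_neg hmi, Nat.div_eq_of_lt (lt_of_not_ge hmi)]
    simp

lemma pv_ta_succ_rec {m : Nat} (hm : 1 ≤ m) (c1 : Nat) (f : Nat → Int) (i : Nat) :
    pvTa m (c1 + 1) f i = pvTa m c1 f i + (if m ≤ i then pvTa m (c1 + 1) f (i - m) else 0) := by
  unfold pvTa
  have hsplit : ∀ t : Nat, ((t + (c1 + 1)).choose (c1 + 1) : Int) =
      ((t + c1).choose c1 : Int) + ((t + c1).choose (c1 + 1) : Int) := by
    intro t
    have h1 : t + (c1 + 1) = (t + c1) + 1 := by omega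
    rw [h1, Nat.choose_succ_succ (t + c1) c1]
    push_cast; ring
  rw [Finset.sum_congr rfl (fun t _ => by rw [hsplit t, mul_add]), Finset.sum_add_distrib]
  congr 1
  by_cases hmi : m ≤ i
  · rw [if_pos hmi, Nat.div_eq_sub_div hm hmi, Finset.sum_range_succ']
    have hzero : f (i - 0 * m) * ((0 + c1).choose (c1 + 1) : Int) = 0 := by
      rw [Nat.choose_eq_zero_of_lt (by omega)]; simp
    rw [hzero, add_zero]
    apply Finset.sum_congr rfl
    intro t _
    have h1 : (t + 1) * m = m + t * m := by ring
    have h2 : i - (t + 1) * m = i - m - t * m := by rw [h1, Nat.sub_sub]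
    have h3 : t + 1 + c1 = t + (c1 + 1) := by omega
    rw [h2, h3]
  · rw [if_neg hmi, Nat.div_eq_of_lt (lt_of_not_ge hmi)]
    rw [Finset.sum_range_one, Nat.choose_eq_zero_of_lt (by omega : 0 + c1 < c1 + 1)]
    simp

-- the alternating identity: (1-q^m)^(c1+1) · (f/(1-q^m)^(c1+1)) = f
lemma pv_alt_identity {m : Nat} (hm : 1 ≤ m) (c1 : Nat) (f : Nat → Int) (i : Nat) :
    ∑ t ∈ Finset.range (i / m + 1),
      (-1 : Int) ^ t * ((c1 + 1).choose t : Int) * pvTa m c1 f (i - t * m) = f i := by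
  have hm' : 0 < m := hm
  induction c1 generalizing i with
  | zero =>
    by_cases hmi : m ≤ i
    · rw [Nat.div_eq_sub_div hm hmi, Finset.sum_range_succ', Finset.sum_range_succ']
      have hz : ∑ t ∈ Finset.range ((i - m) / m),
          (-1 : Int) ^ (t + 1 + 1) * ((0 + 1).choose (t + 1 + 1) : Int) *
            pvTa m 0 f (i - (t + 1 + 1) * m) = 0 := by
        apply Finset.sum_eq_zero
        intro t _
        rw [Nat.choose_eq_zero_of_lt (by omega)]
        simp
      rw [hz]
      simp only [zero_add, pow_zero, pow_one, Nat.choose_self, Nat.choose_zero_right,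
        Nat.cast_one, one_mul, mul_one]
      have h0 : i - 0 * m = i := by simp
      rw [h0, pv_ta_zero_rec hm f i, if_pos hmi]
      ring
    · rw [Nat.div_eq_of_lt (lt_of_not_ge hmi)]
      simp only [zero_add, Finset.sum_range_one, Nat.zero_mul, Nat.sub_zero, pow_zero, one_mul,
        Nat.choose_zero_right, Nat.cast_one]
      exact pv_ta_of_lt f (lt_of_not_ge hmi)
  | succ c1 ih =>
    set q := i / m with hq
    have hsplit : ∀ t : Nat, ((c1 + 1 + 1).choose t : Int) =
        ((c1 + 1).choose t : Int) + (if t = 0 then 0 else ((c1 + 1).choose (t - 1) : Int)) := by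
      intro t
      cases t with
      | zero => simp
      | succ s =>
        rw [Nat.choose_succ_succ (c1 + 1) s, if_neg (Nat.succ_ne_zero s)]
        have h1 : (s + 1 : Nat) - 1 = s := rfl
        rw [h1]
        push_cast
        ring
    have hLHS : ∑ t ∈ Finset.range (q + 1),
        (-1 : Int) ^ t * ((c1 + 1 + 1).choose t : Int) * pvTa m (c1 + 1) f (i - t * m)
        = (∑ t ∈ Finset.range (q + 1),
            (-1 : Int) ^ t * ((c1 + 1).choose t : Int) * pvTa m (c1 + 1) f (i - t * m))
          + ∑ t ∈ Finset.range (q + 1),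
            (-1 : Int) ^ t * (if t = 0 then 0 else ((c1 + 1).choose (t - 1) : Int)) *
              pvTa m (c1 + 1) f (i - t * m) := by
      rw [← Finset.sum_add_distrib]
      apply Finset.sum_congr rfl
      intro t _
      rw [hsplit t]
      ring
    rw [hLHS]
    -- the second (shifted) summand
    have hV : ∑ t ∈ Finset.range (q + 1),
        (-1 : Int) ^ t * (if t = 0 then 0 else ((c1 + 1).choose (t - 1) : Int)) *
          pvTa m (c1 + 1) f (i - t * m)
        = - ∑ t ∈ Finset.range q,
            (-1 : Int) ^ t * ((c1 + 1).choose t : Int) * pvTa m (c1 + 1) f (i - (t + 1) * m) := by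
      rw [Finset.sum_range_succ']
      simp only [if_neg (Nat.succ_ne_zero _), Nat.add_sub_cancel, ite_true, mul_zero, zero_mul, add_zero, pow_succ]
      rw [← Finset.sum_neg_distrib]
      apply Finset.sum_congr rfl
      intro t _
      ring
    -- the first summand, via the ta recurrence
    have hU : ∑ t ∈ Finset.range (q + 1),
        (-1 : Int) ^ t * ((c1 + 1).choose t : Int) * pvTa m (c1 + 1) f (i - t * m)
        = f i + ∑ t ∈ Finset.range q,
            (-1 : Int) ^ t * ((c1 + 1).choose t : Int) * pvTa m (c1 + 1) f (i - (t + 1) * m) := by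
      have hrec : ∀ t ∈ Finset.range (q + 1),
          (-1 : Int) ^ t * ((c1 + 1).choose t : Int) * pvTa m (c1 + 1) f (i - t * m)
          = (-1 : Int) ^ t * ((c1 + 1).choose t : Int) * pvTa m c1 f (i - t * m)
            + (if t < q then (-1 : Int) ^ t * ((c1 + 1).choose t : Int) *
                pvTa m (c1 + 1) f (i - (t + 1) * m) else 0) := by
        intro t ht
        rw [Finset.mem_range] at ht
        have htq : t ≤ q := by omega
        have htm : t * m ≤ i := (Nat.le_div_iff_mul_le hm').mp htq
        have hcond : m ≤ i - t * m ↔ t < q := by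
          rw [Nat.le_sub_iff_add_le htm]
          have : m + t * m = (t + 1) * m := by ring
          rw [this, ← Nat.le_div_iff_mul_le hm']
          omega
        rw [pv_ta_succ_rec hm c1 f (i - t * m), mul_add]
        congr 1
        by_cases hlt : t < q
        · rw [if_pos ((hcond).mpr hlt), if_pos hlt]
          have h1 : (t + 1) * m = t * m + m := by ring
          rw [h1, ← Nat.sub_sub]
        · rw [if_neg (fun hc => hlt (hcond.mp hc)), if_neg hlt, mul_zero]
      rw [Finset.sum_congr rfl hrec, Finset.sum_add_distrib, ih i]
      congr 1
      rw [Finset.sum_range_succ, if_neg (lt_irrefl q), add_zero]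
      apply Finset.sum_congr rfl
      intro t ht
      rw [if_pos (Finset.mem_range.mp ht)]
    rw [hU, hV]
    ring

-- B's update formula, solved for ta i
lemma pv_step_formula {m : Nat} (hm : 1 ≤ m) (c1 : Nat) (f : Nat → Int) (i : Nat) :
    pvTa m c1 f i = f i + ∑ t ∈ Finset.range (i / m),
      (-1 : Int) ^ t * ((c1 + 1).choose (t + 1) : Int) * pvTa m c1 f (i - (t + 1) * m) := by
  have h := pv_alt_identity hm c1 f i
  rw [Finset.sum_range_succ'] at h
  have h0 : (-1 : Int) ^ 0 * ((c1 + 1).choose 0 : Int) * pvTa m c1 f (i - 0 * m)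
      = pvTa m c1 f i := by simp
  rw [h0] at h
  have hneg : ∑ t ∈ Finset.range (i / m),
      (-1 : Int) ^ (t + 1) * ((c1 + 1).choose (t + 1) : Int) * pvTa m c1 f (i - (t + 1) * m)
      = - ∑ t ∈ Finset.range (i / m),
          (-1 : Int) ^ t * ((c1 + 1).choose (t + 1) : Int) * pvTa m c1 f (i - (t + 1) * m) := by
    rw [← Finset.sum_neg_distrib]
    apply Finset.sum_congr rfl
    intro t _
    rw [pow_succ]
    ring
  rw [hneg] at h
  linarith

lemma pv_repr_init (N : Nat) : pvRepr N ((List.replicate (N + 1) 0).set 0 1) pvDelta := by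
  constructor
  · simp
  · intro i _
    rw [pv_getD_set]
    unfold pvDelta
    by_cases hi : i = 0
    · subst hi
      rw [if_pos (by simp)]
      simp
    · rw [if_neg (by simp [Ne.symm hi])]
      simp only [List.getD_eq_getElem?_getD, List.getElem?_replicate]
      split_ifs <;> simp_all

lemma pvComb_eq_choose (a b : Int) : pvComb a b = ((a.toNat).choose b.toNat : Int) := by
  unfold pvComb
  by_cases hk : b.toNat ≤ a.toNat
  · rw [if_pos hk]
    rcases le_total b.toNat (a.toNat - b.toNat) with hmin | hmin
    · rw [min_eq_left hmin, ← Nat.choose_eq_descFactorial_div_factorial]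
    · rw [min_eq_right hmin, ← Nat.choose_eq_descFactorial_div_factorial,
        Nat.choose_symm hk]
  · rw [if_neg hk, Nat.choose_eq_zero_of_lt (by omega)]
    simp

lemma pv_comb_eq {colors : Int} (hc : 1 ≤ colors) (j : Nat) :
    pvComb ((j : Int) + colors - 1) (colors - 1) =
      ((j + (colors.toNat - 1)).choose (colors.toNat - 1) : Int) := by
  rw [pvComb_eq_choose]
  have h1 : ((j : Int) + colors - 1).toNat = j + (colors.toNat - 1) := by omega
  have h2 : (colors - 1).toNat = colors.toNat - 1 := by omega
  rw [h1, h2]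

lemma pv_inner_fold (N m k : Nat) (dk : Int) (ct : Nat → Int) :
    ∀ (js : List Nat) (nd : List Int), nd.length = N + 1 →
      (js.foldl (fun nd j => if k + j * m ≤ N then
          nd.set (k + j * m) (nd.getD (k + j * m) 0 + dk * ct j) else nd) nd).length = N + 1
      ∧ ∀ i, i ≤ N →
        (js.foldl (fun nd j => if k + j * m ≤ N then
            nd.set (k + j * m) (nd.getD (k + j * m) 0 + dk * ct j) else nd) nd).getD i 0
          = nd.getD i 0 + ((js.map (fun j => if k + j * m = i then dk * ct j else 0)).sum) := by
  intro js
  induction js with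
  | nil => intro nd hlen; simp [hlen]
  | cons j js ih =>
    intro nd hlen
    simp only [List.foldl_cons, List.map_cons, List.sum_cons]
    by_cases hj : k + j * m ≤ N
    · rw [if_pos hj]
      have hlen' : (nd.set (k + j * m) (nd.getD (k + j * m) 0 + dk * ct j)).length = N + 1 := by
        rw [List.length_set]; exact hlen
      refine ⟨(ih _ hlen').1, ?_⟩
      intro i hi
      rw [(ih _ hlen').2 i hi, pv_getD_set]
      by_cases he : k + j * m = i
      · rw [if_pos ⟨he, by omega⟩, if_pos he, he]
        ring
      · rw [if_neg (by tauto), if_neg he]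
        ring
    · rw [if_neg hj]
      refine ⟨(ih _ hlen).1, ?_⟩
      intro i hi
      rw [(ih _ hlen).2 i hi, if_neg (by omega)]
      ring

lemma pv_outer_fold (N m : Nat) (dp : List Int) (ct : Nat → Int) :
    ∀ (ks : List Nat) (nd : List Int), nd.length = N + 1 →
      (ks.foldl (fun nd k =>
        if dp.getD k 0 = 0 then nd
        else (List.range ((N - k) / m + 1)).foldl (fun nd j => if k + j * m ≤ N then
          nd.set (k + j * m) (nd.getD (k + j * m) 0 + dp.getD k 0 * ct j) else nd) nd) nd).length = N + 1
      ∧ ∀ i, i ≤ N →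
        (ks.foldl (fun nd k =>
          if dp.getD k 0 = 0 then nd
          else (List.range ((N - k) / m + 1)).foldl (fun nd j => if k + j * m ≤ N then
            nd.set (k + j * m) (nd.getD (k + j * m) 0 + dp.getD k 0 * ct j) else nd) nd) nd).getD i 0
          = nd.getD i 0 +
            ((ks.map (fun k => ((List.range ((N - k) / m + 1)).map
              (fun j => if k + j * m = i then dp.getD k 0 * ct j else 0)).sum)).sum) := by
  intro ks
  induction ks with
  | nil => intro nd hlen; simpa using hlen
  | cons k ks ih =>
    intro nd hlen
    simp only [List.foldl_cons, List.map_cons, List.sum_cons]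
    by_cases h0 : dp.getD k 0 = 0
    · rw [if_pos h0]
      refine ⟨(ih _ hlen).1, ?_⟩
      intro i hi
      rw [(ih _ hlen).2 i hi]
      have hz : ((List.range ((N - k) / m + 1)).map
          (fun j => if k + j * m = i then dp.getD k 0 * ct j else 0)).sum = 0 := by
        apply List.sum_eq_zero
        intro x hx
        rw [List.mem_map] at hx
        obtain ⟨j, _, hj⟩ := hx
        rw [← hj, h0]
        split_ifs <;> ring
      rw [hz]
      ring
    · rw [if_neg h0]
      have hin := pv_inner_fold N m k (dp.getD k 0) ct (List.range ((N - k) / m + 1)) nd hlen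
      refine ⟨(ih _ hin.1).1, ?_⟩
      intro i hi
      rw [(ih _ hin.1).2 i hi, hin.2 i hi]
      ring

lemma pv_foldl_guard_add (P : Nat → Prop) [DecidablePred P] (g : Nat → Int) :
    ∀ (ts : List Nat) (s0 : Int),
      ts.foldl (fun s t => if P t then s + g t else s) s0
        = s0 + (ts.map (fun t => if P t then g t else 0)).sum := by
  intro ts
  induction ts with
  | nil => simp
  | cons t ts ih =>
    intro s0
    simp only [List.foldl_cons, List.map_cons, List.sum_cons]
    by_cases h : P t
    · rw [if_pos h, if_pos h, ih]
      ring
    · rw [if_neg h, if_neg h, ih]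
      ring

lemma pv_getD_map_range' (g : Nat → Int) (L j : Nat) (h : j < L) :
    ((List.range' 1 L).map g).getD j 0 = g (1 + j) := by
  rw [List.getD_eq_getElem?_getD, List.getElem?_eq_getElem (by simpa using h)]
  simp [List.getElem_range']

lemma pv_astep_repr {N m : Nat} {colors : Int} (hc : 1 ≤ colors) (hm : 1 ≤ m)
    {dp : List Int} {f : Nat → Int} (h : pvRepr N dp f) :
    pvRepr N (pvAStep N colors dp m) (pvTa m (colors.toNat - 1) f) := by
  obtain ⟨hlen, hval⟩ := h
  have hm' : 0 < m := hm
  have hrepl : (List.replicate (N + 1) (0 : Int)).length = N + 1 := by simp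
  have hout := pv_outer_fold N m dp (fun j => pvComb ((j : Int) + colors - 1) (colors - 1))
    (List.range (N + 1)) (List.replicate (N + 1) 0) hrepl
  refine ⟨hout.1, ?_⟩
  intro i hi
  refine (hout.2 i hi).trans ?_
  have hz : (List.replicate (N + 1) (0 : Int)).getD i 0 = 0 := by
    simp only [List.getD_eq_getElem?_getD, List.getElem?_replicate]
    split_ifs <;> rfl
  rw [hz, zero_add, pv_sum_map_range]
  rw [Finset.sum_congr rfl (fun k _ => pv_sum_map_range
    (fun j => if k + j * m = i then dp.getD k 0 * pvComb ((j : Int) + colors - 1) (colors - 1) else 0)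
    ((N - k) / m + 1))]
  have hext : ∀ k ∈ Finset.range (N + 1),
      (∑ j ∈ Finset.range ((N - k) / m + 1),
        if k + j * m = i then dp.getD k 0 * pvComb ((j : Int) + colors - 1) (colors - 1) else 0)
      = ∑ j ∈ Finset.range (N + 1),
          if k + j * m = i then dp.getD k 0 * pvComb ((j : Int) + colors - 1) (colors - 1) else 0 := by
    intro k _
    apply Finset.sum_subset (fun x hx => by
      rw [Finset.mem_range] at hx ⊢
      have := Nat.div_le_self (N - k) m
      omega)
    intro x hx hnx
    rw [Finset.mem_range] at hx hnx
    have hxm : ¬ (k + x * m = i) := by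
      intro he
      have h1 : x * m ≤ N - k := by omega
      have h2 : x ≤ (N - k) / m := (Nat.le_div_iff_mul_le hm').mpr h1
      omega
    rw [if_neg hxm]
  rw [Finset.sum_congr rfl hext]
  rw [Finset.sum_congr rfl (fun k hk => Finset.sum_congr rfl (fun j _ => by
    rw [hval k (by have := Finset.mem_range.mp hk; omega)]))]
  rw [Finset.sum_comm]
  have hone : ∀ j ∈ Finset.range (N + 1),
      (∑ k ∈ Finset.range (N + 1),
        if k + j * m = i then f k * pvComb ((j : Int) + colors - 1) (colors - 1) else 0)
      = (if j * m ≤ i then f (i - j * m) * pvComb ((j : Int) + colors - 1) (colors - 1) else 0) := by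
    intro j _
    by_cases hj : j * m ≤ i
    · rw [if_pos hj]
      rw [Finset.sum_eq_single_of_mem (i - j * m) (Finset.mem_range.mpr (by omega))]
      · rw [if_pos (by omega)]
      · intro k _ hkne
        rw [if_neg (by omega)]
    · rw [if_neg hj]
      apply Finset.sum_eq_zero
      intro k _
      rw [if_neg (by omega)]
  rw [Finset.sum_congr rfl hone]
  have hsub : Finset.range (i / m + 1) ⊆ Finset.range (N + 1) := by
    intro x hx
    rw [Finset.mem_range] at hx ⊢
    have hd := Nat.div_le_self i m
    omega
  unfold pvTa
  rw [← Finset.sum_subset hsub (fun x _ hx => by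
    rw [if_neg (fun hc' => hx (Finset.mem_range.mpr (by
      have := (Nat.le_div_iff_mul_le hm').mpr hc'
      omega)))])]
  apply Finset.sum_congr rfl
  intro j hj
  have hjm : j * m ≤ i := (Nat.le_div_iff_mul_le hm').mp (by
    have := Finset.mem_range.mp hj; omega)
  rw [if_pos hjm, pv_comb_eq hc j]

lemma pv_bpass_inv (N m : Nat) (colors : Int) (hc : 1 ≤ colors) (hm : 1 ≤ m)
    (f : Nat → Int) (coefs : List Int)
    (hclen : coefs.length = min colors.toNat (N / m))
    (hcval : ∀ j, j < min colors.toNat (N / m) →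
      coefs.getD j 0 = (-1 : Int) ^ j * ((colors.toNat).choose (j + 1) : Int))
    (dp : List Int) (hdlen : dp.length = N + 1) (hdval : ∀ i, i ≤ N → dp.getD i 0 = f i) :
    ∀ (len : Nat), m + len ≤ N + 1 →
      ((List.range' m len).foldl (fun dp i =>
        dp.set i (dp.getD i 0 + (List.range' 1 coefs.length).foldl (fun s t =>
          if t * m ≤ i then s + coefs.getD (t - 1) 0 * dp.getD (i - t * m) 0 else s) 0)) dp).length
        = N + 1
      ∧ ∀ i, i ≤ N →
        ((List.range' m len).foldl (fun dp i =>
          dp.set i (dp.getD i 0 + (List.range' 1 coefs.length).foldl (fun s t =>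
            if t * m ≤ i then s + coefs.getD (t - 1) 0 * dp.getD (i - t * m) 0 else s) 0)) dp).getD i 0
          = if i < m + len then pvTa m (colors.toNat - 1) f i else f i := by
  have hm' : 0 < m := hm
  intro len
  induction len with
  | zero =>
    intro _
    refine ⟨by simpa using hdlen, ?_⟩
    intro i hi
    simp only [List.range'_zero, List.foldl_nil]
    rw [hdval i hi]
    split_ifs with hlt
    · exact (pv_ta_of_lt f (by omega)).symm
    · rfl
  | succ len ih =>
    intro hle
    obtain ⟨ihlen, ihval⟩ := ih (by omega)
    rw [List.range'_concat, List.foldl_append]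
    simp only [one_mul, List.foldl_cons, List.foldl_nil]
    refine ⟨by rw [List.length_set]; exact ihlen, ?_⟩
    intro i hi
    rw [pv_getD_set]
    by_cases he : m + len = i
    · rw [if_pos ⟨he, by rw [ihlen]; omega⟩]
      subst he
      set i0 := m + len with hi0
      set prev := (List.range' m len).foldl (fun dp i =>
        dp.set i (dp.getD i 0 + (List.range' 1 coefs.length).foldl (fun s t =>
          if t * m ≤ i then s + coefs.getD (t - 1) 0 * dp.getD (i - t * m) 0 else s) 0)) dp
        with hprevdef
      have hprev0 : prev.getD i0 0 = f i0 := by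
        rw [ihval i0 hi, if_neg (by omega)]
      have hs : (List.range' 1 coefs.length).foldl (fun s t =>
            if t * m ≤ i0 then s + coefs.getD (t - 1) 0 * prev.getD (i0 - t * m) 0 else s) 0
          = ∑ t ∈ Finset.range (i0 / m),
              (-1 : Int) ^ t * ((colors.toNat).choose (t + 1) : Int) *
                pvTa m (colors.toNat - 1) f (i0 - (t + 1) * m) := by
        rw [pv_foldl_guard_add (fun t => t * m ≤ i0)
          (fun t => coefs.getD (t - 1) 0 * prev.getD (i0 - t * m) 0), zero_add,
          pv_sum_map_range' _ coefs.length 1, hclen]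
        have hq0N : i0 / m ≤ N / m := Nat.div_le_div_right hi
        have hterm : ∀ j ∈ Finset.range (min colors.toNat (N / m)),
            (if (1 + j) * m ≤ i0 then
              coefs.getD (1 + j - 1) 0 * prev.getD (i0 - (1 + j) * m) 0 else 0)
            = (if j < i0 / m then (-1 : Int) ^ j * ((colors.toNat).choose (j + 1) : Int) *
                pvTa m (colors.toNat - 1) f (i0 - (j + 1) * m) else 0) := by
          intro j hj
          rw [Finset.mem_range] at hj
          have hcond : (1 + j) * m ≤ i0 ↔ j < i0 / m := by
            rw [← Nat.le_div_iff_mul_le hm']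
            omega
          by_cases hg : (1 + j) * m ≤ i0
          · rw [if_pos hg, if_pos (hcond.mp hg)]
            have h1 : 1 + j - 1 = j := by omega
            have hmle : m ≤ (1 + j) * m := by
              calc m = 1 * m := (one_mul m).symm
              _ ≤ (1 + j) * m := Nat.mul_le_mul_right m (by omega)
            have hidx : prev.getD (i0 - (1 + j) * m) 0
                = pvTa m (colors.toNat - 1) f (i0 - (1 + j) * m) := by
              rw [ihval (i0 - (1 + j) * m) (by omega), if_pos (by omega)]
            rw [h1, hcval j hj, hidx]
            have h2 : 1 + j = j + 1 := by omega
            rw [h2]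
          · rw [if_neg hg, if_neg (fun h => hg (hcond.mpr h))]
        rw [Finset.sum_congr rfl hterm]
        have hstep1 : ∑ j ∈ Finset.range (min colors.toNat (N / m)),
            (if j < i0 / m then (-1 : Int) ^ j * ((colors.toNat).choose (j + 1) : Int) *
              pvTa m (colors.toNat - 1) f (i0 - (j + 1) * m) else 0)
            = ∑ j ∈ Finset.range (min (min colors.toNat (N / m)) (i0 / m)),
              (-1 : Int) ^ j * ((colors.toNat).choose (j + 1) : Int) *
                pvTa m (colors.toNat - 1) f (i0 - (j + 1) * m) := by
          have hsub2 : Finset.range (min (min colors.toNat (N / m)) (i0 / m)) ⊆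
              Finset.range (min colors.toNat (N / m)) := by
            intro x hx
            rw [Finset.mem_range] at hx ⊢
            omega
          have hz2 : ∀ x ∈ Finset.range (min colors.toNat (N / m)),
              x ∉ Finset.range (min (min colors.toNat (N / m)) (i0 / m)) →
              (if x < i0 / m then (-1 : Int) ^ x * ((colors.toNat).choose (x + 1) : Int) *
                pvTa m (colors.toNat - 1) f (i0 - (x + 1) * m) else 0) = 0 := by
            intro x hx hnx
            rw [Finset.mem_range] at hx hnx
            have hq : ¬ x < i0 / m := by omega
            rw [if_neg hq]
          rw [← Finset.sum_subset hsub2 hz2]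
          apply Finset.sum_congr rfl
          intro j hj
          rw [Finset.mem_range] at hj
          have hq : j < i0 / m := by omega
          rw [if_pos hq]
        rw [hstep1]
        apply Finset.sum_subset (fun x hx => by rw [Finset.mem_range] at hx ⊢; omega : Finset.range (min (min colors.toNat (N / m)) (i0 / m)) ⊆ Finset.range (i0 / m))
        intro x hx hnx
        rw [Finset.mem_range] at hx
        rw [Finset.mem_range] at hnx
        have hLx : colors.toNat ≤ x := by omega
        rw [Nat.choose_eq_zero_of_lt (by omega)]
        simp
      rw [hs, hprev0]
      rw [if_pos (by omega)]
      have hc1 : colors.toNat - 1 + 1 = colors.toNat := by omega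
      have hf := pv_step_formula hm (colors.toNat - 1) f i0
      rw [hc1] at hf
      exact hf.symm
    · rw [if_neg (by tauto)]
      rw [ihval i hi]
      by_cases hlt : i < m + len
      · rw [if_pos hlt, if_pos (by omega)]
      · rw [if_neg hlt, if_neg (by omega)]

lemma pv_bstep_repr {N m : Nat} {colors : Int} (hc : 1 ≤ colors) (hm : 1 ≤ m)
    {dp : List Int} {f : Nat → Int} (h : pvRepr N dp f) :
    pvRepr N (pvBStep N colors dp m) (pvTa m (colors.toNat - 1) f) := by
  obtain ⟨hdlen, hdval⟩ := h
  have hclen : ((List.range' 1 (min colors ((N / m : Nat) : Int)).toNat).map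
      (fun (t : Nat) => (-1 : Int) ^ (t + 1) * pvComb colors (t : Int))).length
      = min colors.toNat (N / m) := by
    rw [List.length_map, List.length_range']
    rcases le_total colors ((N / m : Nat) : Int) with hle | hle
    · rw [min_eq_left hle, min_eq_left (by omega : colors.toNat ≤ N / m)]
    · rw [min_eq_right hle, min_eq_right (by omega : N / m ≤ colors.toNat), Int.toNat_natCast]
  have hcval : ∀ j, j < min colors.toNat (N / m) →
      ((List.range' 1 (min colors ((N / m : Nat) : Int)).toNat).map
        (fun (t : Nat) => (-1 : Int) ^ (t + 1) * pvComb colors (t : Int))).getD j 0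
      = (-1 : Int) ^ j * ((colors.toNat).choose (j + 1) : Int) := by
    intro j hj
    rw [pv_getD_map_range' _ _ j (by omega), pvComb_eq_choose, Int.toNat_natCast]
    have h3 : 1 + j = j + 1 := Nat.add_comm 1 j
    rw [h3, pow_succ, pow_succ]
    ring
  by_cases hmN : m ≤ N
  · have hinv := pv_bpass_inv N m colors hc hm f _ hclen hcval dp hdlen hdval
      (N + 1 - m) (by omega)
    refine ⟨hinv.1, ?_⟩
    intro i hi
    have h2 := hinv.2 i hi
    rw [if_pos (by omega)] at h2
    exact h2
  · have h0 : N + 1 - m = 0 := by omega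
    unfold pvBStep
    rw [h0]
    simp only [List.range'_zero, List.foldl_nil]
    refine ⟨hdlen, ?_⟩
    intro i hi
    rw [hdval i hi]
    exact (pv_ta_of_lt f (by omega)).symm

lemma pv_fold_repr {N : Nat} {colors : Int}
    (step : List Int → Nat → List Int)
    (hstep : ∀ (m : Nat) (dp : List Int) (f : Nat → Int), 1 ≤ m → pvRepr N dp f →
      pvRepr N (step dp m) (pvTa m (colors.toNat - 1) f))
    (ms : List Nat) (hms : ∀ m ∈ ms, 1 ≤ m) :
    ∀ (dp : List Int) (f : Nat → Int), pvRepr N dp f →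
      pvRepr N (ms.foldl step dp) (ms.foldl (fun f m => pvTa m (colors.toNat - 1) f) f) := by
  induction ms with
  | nil => intro dp f h; simpa using h
  | cons m ms ih =>
    intro dp f h
    simp only [List.foldl_cons]
    exact ih (fun m' hm' => hms m' (List.mem_cons_of_mem m hm')) _ _
      (hstep m dp f (hms m List.mem_cons_self) h)

lemma pv_main_eq (n colors : Int) (hc : 1 ≤ colors) :
    colored_partitions_py n colors = colored_partitions_py_alt n colors := by
  have hms : ∀ m ∈ List.range' 1 n.toNat, 1 ≤ m := by
    intro m hm
    rw [List.mem_range'_1] at hm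
    omega
  have hA := pv_fold_repr (N := n.toNat) (pvAStep n.toNat colors)
    (fun m dp f hm h => pv_astep_repr hc hm h) (List.range' 1 n.toNat) hms _ _
    (pv_repr_init n.toNat)
  have hB := pv_fold_repr (N := n.toNat) (pvBStep n.toNat colors)
    (fun m dp f hm h => pv_bstep_repr hc hm h) (List.range' 1 n.toNat) hms _ _
    (pv_repr_init n.toNat)
  exact (hA.2 n.toNat le_rfl).trans ((hB.2 n.toNat le_rfl).symm)

-- ===== VERDICT (by name: the statement is the Claim_ definition above) =====
theorem colored_partitions_py_spec : Claim_equal_colored_partitions_py := by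
  intro n colors _ hpre
  unfold Spec_colored_partitions_py
  rcases hpre with ⟨hn, hn0 | hc⟩
  · subst hn0; rfl
  · exact pv_main_eq n colors hc
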